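-- pv_equiv track=rewrite | github.com/rrsathe/cqg_pipeline | transcript_loader.py | _split_plain_text_into_turns
-- ===== SOURCE A (Python) =====
-- from typing import List, Dict, Any, Optional
--
-- def _split_plain_text_into_turns(text: str) -> List[str]:
--     """
--     Split plain text into turns based on speaker labels.
--
--     Args:
--         text: Plain text with speaker labels
--
--     Returns:
--         List of turn strings (Speaker: text)
--     """
--     # Common speaker patterns
--     speaker_patterns = [
--         "Agent:",
--         "Customer:",
--         "Representative:",
--         "User:",
--         "Caller:",
--         "Support:",
--     ]
--
--     turns = []
--     current_turn = []
--
--     for line in text.split('\n'):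
--         line = line.strip()
--         if not line:
--             continue
--
--         # Check if line starts with speaker label
--         is_new_turn = any(line.startswith(pattern) for pattern in speaker_patterns)
--
--         if is_new_turn:
--             # Save previous turn
--             if current_turn:
--                 turns.append(" ".join(current_turn))
--             # Start new turn
--             current_turn = [line]
--         else:
--             # Continue current turn
--             current_turn.append(line)
--
--     # Save last turn
--     if current_turn:
--         turns.append(" ".join(current_turn))
--
--     return turns
-- ===== SOURCE B (Python) =====
-- from typing import List
--
--
-- def _split_plain_text_into_turns(text: str) -> List[str]:
--     """Peel off one turn block at a time from a precomputed list of cleaned lines,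
--     instead of maintaining a running current-turn accumulator."""
--     patterns = (
--         "Agent:",
--         "Customer:",
--         "Representative:",
--         "User:",
--         "Caller:",
--         "Support:",
--     )
--     cleaned = [l.strip() for l in text.split('\n') if l.strip()]
--
--     def peel(lines: List[str]) -> List[str]:
--         if not lines:
--             return []
--         block = [lines[0]]
--         rest = lines[1:]
--         while rest and not rest[0].startswith(patterns):
--             block.append(rest[0])
--             rest = rest[1:]
--         return [" ".join(block)] + peel(rest)
--
--     return peel(cleaned)
-- ===== Notes on version B (the rewrite author's own statement) =====
-- stated objective: alternative
-- what changed: Replaces A's running current-turn accumulator with a precompute-then-peel decomposition: B first materializes the cleaned line list, then recursively peels one whole turn block (header line plus following continuation lines) per step.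
import Mathlib
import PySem

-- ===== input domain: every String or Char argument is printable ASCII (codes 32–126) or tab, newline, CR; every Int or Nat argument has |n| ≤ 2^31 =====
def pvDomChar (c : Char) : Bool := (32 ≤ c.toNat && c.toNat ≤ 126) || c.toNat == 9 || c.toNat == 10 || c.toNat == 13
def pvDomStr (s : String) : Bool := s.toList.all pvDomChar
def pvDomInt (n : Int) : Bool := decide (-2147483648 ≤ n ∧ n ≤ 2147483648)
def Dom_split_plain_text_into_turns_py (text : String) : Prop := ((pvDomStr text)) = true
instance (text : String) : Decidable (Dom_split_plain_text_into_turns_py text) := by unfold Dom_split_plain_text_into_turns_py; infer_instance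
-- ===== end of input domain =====

-- B peels one turn block at a time from a precomputed cleaned-line list instead of
-- maintaining A's running current-turn accumulator; objective: alternative decomposition.

-- ===== PORT A =====
def pvSpeakerPatterns : List String :=
  ["Agent:", "Customer:", "Representative:", "User:", "Caller:", "Support:"]

-- the body of A's for-loop: strip, skip blanks, flush on a speaker line
def pvA_step (st : List String × List String) (line : String) : List String × List String :=
  let line := PySem.Str.strip line
  if line = "" then st
  else
    let isNewTurn := pvSpeakerPatterns.any (fun p => PySem.Str.startswith line p)
    if isNewTurn then
      ((if st.2 ≠ [] then st.1 ++ [PySem.Str.join " " st.2] else st.1), [line])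
    else (st.1, st.2 ++ [line])

def split_plain_text_into_turns_py (text : String) : List String :=
  let st := ((PySem.Str.split? text "\n").getD []).foldl pvA_step ([], [])
  if st.2 ≠ [] then st.1 ++ [PySem.Str.join " " st.2] else st.1

-- ===== PORT B =====
def pvIsSpeaker (l : String) : Bool :=
  pvSpeakerPatterns.any (fun p => PySem.Str.startswith l p)

-- the inner while loop of Source B's peel: extend the block until the next speaker line
def pvGrab : List String → List String × List String
  | [] => ([], [])
  | x :: xs =>
      if pvIsSpeaker x then ([], x :: xs)
      else
        let (b, r) := pvGrab xs
        (x :: b, r)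

theorem pvGrab_rest_le (xs : List String) : (pvGrab xs).2.length ≤ xs.length := by
  induction xs with
  | nil => simp [pvGrab]
  | cons x xs ih =>
    simp only [pvGrab]
    split
    · simp
    · simpa using Nat.le_succ_of_le ih

def pvPeel : List String → List String
  | [] => []
  | x :: xs =>
      let br := pvGrab xs
      PySem.Str.join " " (x :: br.1) :: pvPeel br.2
termination_by l => l.length
decreasing_by
  simpa using Nat.lt_succ_of_le (pvGrab_rest_le xs)

def split_plain_text_into_turns_py_alt (text : String) : List String :=
  pvPeel ((((PySem.Str.split? text "\n").getD []).map PySem.Str.strip).filter (· ≠ ""))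

-- ===== PRECONDITION & SPEC =====
def Spec_split_plain_text_into_turns_py (text : String) (out : List String) : Prop := out = split_plain_text_into_turns_py_alt text
instance (text : String) (out : List String) : Decidable (Spec_split_plain_text_into_turns_py text out) := by unfold Spec_split_plain_text_into_turns_py; infer_instance

-- ===== CLAIM (what is proved, stated in full; the proofs are below) =====
def Claim_equal_split_plain_text_into_turns_py : Prop := ∀ (text : String), Dom_split_plain_text_into_turns_py text → Spec_split_plain_text_into_turns_py text (split_plain_text_into_turns_py text)

-- ===== LEMMAS AND PROOFS =====

-- A's loop body on an already-cleaned (stripped, nonblank) line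
def pvStepC (st : List String × List String) (line : String) : List String × List String :=
  if pvIsSpeaker line then
    ((if st.2 ≠ [] then st.1 ++ [PySem.Str.join " " st.2] else st.1), [line])
  else (st.1, st.2 ++ [line])

def pvFinal (st : List String × List String) : List String :=
  if st.2 ≠ [] then st.1 ++ [PySem.Str.join " " st.2] else st.1

theorem pvA_step_eq (st : List String × List String) (line : String) :
    pvA_step st line =
      if PySem.Str.strip line = "" then st else pvStepC st (PySem.Str.strip line) := by
  simp only [pvA_step, pvStepC, pvIsSpeaker]; rfl

theorem pv_fold_clean (ls : List String) (st : List String × List String) :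
    ls.foldl pvA_step st =
      ((ls.map PySem.Str.strip).filter (· ≠ "")).foldl pvStepC st := by
  induction ls generalizing st with
  | nil => rfl
  | cons x xs ih =>
    simp only [List.foldl_cons, List.map_cons, List.filter_cons, pvA_step_eq]
    by_cases h : PySem.Str.strip x = "" <;> simp [h, ih]

theorem pv_loop_peel (l : List String) (ts cur : List String) (hcur : cur ≠ []) :
    pvFinal (l.foldl pvStepC (ts, cur)) =
      ts ++ PySem.Str.join " " (cur ++ (pvGrab l).1) :: pvPeel (pvGrab l).2 := by
  induction l generalizing ts cur with
  | nil => simp [pvGrab, pvPeel, pvFinal, hcur]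
  | cons x xs ih =>
    simp only [List.foldl_cons, pvStepC, pvGrab]
    by_cases hx : pvIsSpeaker x = true
    · simp only [hx, if_pos, hcur, ne_eq, not_false_iff]
      rw [ih _ _ (by simp)]
      simp [pvPeel, List.append_assoc]
    · simp only [hx, if_neg, Bool.false_eq_true, not_false_iff]
      rw [ih ts (cur ++ [x]) (by simp)]
      simp [List.append_assoc]

theorem pv_final_peel (l : List String) :
    pvFinal (l.foldl pvStepC ([], [])) = pvPeel l := by
  cases l with
  | nil => simp [pvFinal, pvPeel]
  | cons x xs =>
    have hstep : pvStepC ([], []) x = ([], [x]) := by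
      simp [pvStepC]
    simp only [List.foldl_cons, hstep]
    rw [pv_loop_peel xs [] [x] (by simp)]
    simp [pvPeel]

-- ===== VERDICT (by name: the statement is the Claim_ definition above) =====
theorem split_plain_text_into_turns_py_spec : Claim_equal_split_plain_text_into_turns_py := by
  intro text _
  unfold Spec_split_plain_text_into_turns_py split_plain_text_into_turns_py
    split_plain_text_into_turns_py_alt
  show pvFinal (List.foldl pvA_step ([], []) ((PySem.Str.split? text "\n").getD [])) = _
  rw [pv_fold_clean]
  exact pv_final_peel _
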